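-- pv_equiv track=rewrite | github.com/justinbrianhwang/Quantum-Simulator | quantum_sim/gui/panels/resource_monitor.py | _max_qubits_for_ram
-- ===== SOURCE A (Python) =====
-- def _max_qubits_for_ram(ram_bytes: int, mode: str = "sv") -> int:
--     if mode == "dm":
--         n = 1
--         while (2 ** (2 * n)) * 16 < ram_bytes:
--             n += 1
--         return n - 1
--     n = 1
--     while (2 ** n) * 16 < ram_bytes:
--         n += 1
--     return n - 1
-- ===== SOURCE B (Python) =====
-- def _max_qubits_for_ram(ram_bytes: int, mode: str = "sv") -> int:
--     # Closed form: the sv loop stops at the smallest n with 2**(n+4) >= ram_bytes,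
--     # i.e. n + 4 >= (ram_bytes-1).bit_length(); dm likewise with exponent 2n+4.
--     if ram_bytes <= 32:
--         return 0
--     k = (ram_bytes - 1).bit_length()
--     return (k - 5) // 2 if mode == "dm" else k - 5
-- ===== Notes on version B (the rewrite author's own statement) =====
-- stated objective: alternative
-- what changed: Replaced the incrementing while-loop with a closed-form computation from (ram_bytes-1).bit_length(), with a single <=32 base case covering small and non-positive inputs.
import Mathlib
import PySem

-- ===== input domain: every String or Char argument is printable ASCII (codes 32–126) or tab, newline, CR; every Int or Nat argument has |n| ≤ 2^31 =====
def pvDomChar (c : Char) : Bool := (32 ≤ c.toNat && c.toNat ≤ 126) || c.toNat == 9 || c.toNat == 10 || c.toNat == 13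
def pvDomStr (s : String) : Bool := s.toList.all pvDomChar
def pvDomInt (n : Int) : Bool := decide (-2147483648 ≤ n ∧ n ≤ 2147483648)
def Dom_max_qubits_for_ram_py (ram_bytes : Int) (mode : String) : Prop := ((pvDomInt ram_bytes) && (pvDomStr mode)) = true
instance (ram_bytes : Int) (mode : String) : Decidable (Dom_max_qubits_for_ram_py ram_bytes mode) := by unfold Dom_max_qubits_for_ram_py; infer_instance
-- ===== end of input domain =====

-- B replaces A's incrementing while-loop by a closed form from the bit length of ram_bytes-1 (a different algorithm; timing was not measurably different on the tested sizes).

-- ===== PORT A =====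
-- the sv while-loop: n = 1; while 2**n * 16 < ram_bytes: n += 1
def pvLoopSV (ram : Int) (n : Nat) : Nat :=
  if (2 : Int) ^ n * 16 < ram then pvLoopSV ram (n + 1) else n
termination_by ram.toNat - 2 ^ n
decreasing_by
  rename_i h
  have hcast : ((2 ^ n * 16 : Nat) : Int) = (2 : Int) ^ n * 16 := by push_cast; ring
  have h3 : 2 ^ (n + 1) = 2 * 2 ^ n := by ring
  have h4 : 1 ≤ 2 ^ n := Nat.one_le_two_pow
  omega

-- the dm while-loop: n = 1; while 2**(2*n) * 16 < ram_bytes: n += 1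
def pvLoopDM (ram : Int) (n : Nat) : Nat :=
  if (2 : Int) ^ (2 * n) * 16 < ram then pvLoopDM ram (n + 1) else n
termination_by ram.toNat - 2 ^ (2 * n)
decreasing_by
  rename_i h
  have hcast : ((2 ^ (2 * n) * 16 : Nat) : Int) = (2 : Int) ^ (2 * n) * 16 := by push_cast; ring
  have h3 : 2 ^ (2 * (n + 1)) = 4 * 2 ^ (2 * n) := by ring
  have h4 : 1 ≤ 2 ^ (2 * n) := Nat.one_le_two_pow
  omega

def max_qubits_for_ram_py (ram_bytes : Int) (mode : String) : Int :=
  if mode == "dm" then (pvLoopDM ram_bytes 1 : Int) - 1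
  else (pvLoopSV ram_bytes 1 : Int) - 1

-- ===== PORT B =====
-- closed form via (ram_bytes - 1).bit_length(); PySem.Int.bitLength is Python's int.bit_length
def max_qubits_for_ram_py_alt (ram_bytes : Int) (mode : String) : Int :=
  if ram_bytes ≤ 32 then 0
  else
    let k : Int := (PySem.Int.bitLength (ram_bytes - 1) : Int)
    if mode == "dm" then PySem.Int.floordiv (k - 5) 2 else k - 5

-- ===== PRECONDITION & SPEC =====
def Spec_max_qubits_for_ram_py (ram_bytes : Int) (mode : String) (out : Int) : Prop := out = max_qubits_for_ram_py_alt ram_bytes mode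
instance (ram_bytes : Int) (mode : String) (out : Int) : Decidable (Spec_max_qubits_for_ram_py ram_bytes mode out) := by unfold Spec_max_qubits_for_ram_py; infer_instance

-- ===== CLAIM (what is proved, stated in full; the proofs are below) =====
def Claim_equal_max_qubits_for_ram_py : Prop := ∀ (ram_bytes : Int) (mode : String), Dom_max_qubits_for_ram_py ram_bytes mode → Spec_max_qubits_for_ram_py ram_bytes mode (max_qubits_for_ram_py ram_bytes mode)

-- ===== LEMMAS AND PROOFS =====

theorem pvLoopSV_eq (ram : Int) (n m : Nat) (hnm : n ≤ m)
    (h1 : ∀ j, n ≤ j → j < m → (2 : Int) ^ j * 16 < ram)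
    (h2 : ¬ ((2 : Int) ^ m * 16 < ram)) : pvLoopSV ram n = m := by
  induction hm : m - n generalizing n with
  | zero =>
    have : n = m := by omega
    subst this
    rw [pvLoopSV.eq_def, if_neg h2]
  | succ d ih =>
    rw [pvLoopSV.eq_def, if_pos (h1 n le_rfl (by omega))]
    exact ih (n + 1) (by omega) (fun j hj hj' => h1 j (by omega) hj') (by omega)

theorem pvLoopDM_eq (ram : Int) (n m : Nat) (hnm : n ≤ m)
    (h1 : ∀ j, n ≤ j → j < m → (2 : Int) ^ (2 * j) * 16 < ram)
    (h2 : ¬ ((2 : Int) ^ (2 * m) * 16 < ram)) : pvLoopDM ram n = m := by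
  induction hm : m - n generalizing n with
  | zero =>
    have : n = m := by omega
    subst this
    rw [pvLoopDM.eq_def, if_neg h2]
  | succ d ih =>
    rw [pvLoopDM.eq_def, if_pos (h1 n le_rfl (by omega))]
    exact ih (n + 1) (by omega) (fun j hj hj' => h1 j (by omega) hj') (by omega)

-- the loop guard in terms of the bit length of ram-1, for ram > 32
theorem guard_iff (ram : Int) (hram : 32 < ram) (e : Nat) :
    ((2 : Int) ^ e * 16 < ram ↔ e + 4 < PySem.Int.bitLength (ram - 1)) := by
  have hne : ram - 1 ≠ 0 := by omega
  have hlt : (ram - 1).natAbs < 2 ^ PySem.Int.bitLength (ram - 1) :=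
    PySem.Int.lt_two_pow_bitLength _
  have hle : 2 ^ (PySem.Int.bitLength (ram - 1) - 1) ≤ (ram - 1).natAbs :=
    PySem.Int.two_pow_bitLength_le _ hne
  have hcast : ((2 ^ (e + 4) : Nat) : Int) = (2 : Int) ^ e * 16 := by
    push_cast [pow_add]; norm_num
  constructor
  · intro h
    by_contra hc
    push_neg at hc
    have hmono : (2 : Nat) ^ PySem.Int.bitLength (ram - 1) ≤ 2 ^ (e + 4) :=
      Nat.pow_le_pow_right (by norm_num) hc
    omega
  · intro h
    have hmono : (2 : Nat) ^ (e + 4) ≤ 2 ^ (PySem.Int.bitLength (ram - 1) - 1) :=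
      Nat.pow_le_pow_right (by norm_num) (by omega)
    omega

theorem bl_ge_six (ram : Int) (hram : 32 < ram) : 6 ≤ PySem.Int.bitLength (ram - 1) := by
  by_contra hc
  push_neg at hc
  have hlt : (ram - 1).natAbs < 2 ^ PySem.Int.bitLength (ram - 1) :=
    PySem.Int.lt_two_pow_bitLength _
  have hmono : (2 : Nat) ^ PySem.Int.bitLength (ram - 1) ≤ 2 ^ 5 :=
    Nat.pow_le_pow_right (by norm_num) (by omega)
  norm_num at hmono
  omega

theorem sv_case (ram : Int) (hram : 32 < ram) :
    pvLoopSV ram 1 = PySem.Int.bitLength (ram - 1) - 4 := by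
  have h6 := bl_ge_six ram hram
  apply pvLoopSV_eq ram 1 _ (by omega)
  · intro j hj hj'
    rw [guard_iff ram hram]
    omega
  · rw [guard_iff ram hram]
    omega

theorem dm_case (ram : Int) (hram : 32 < ram) :
    pvLoopDM ram 1 = (PySem.Int.bitLength (ram - 1) - 3) / 2 := by
  have h6 := bl_ge_six ram hram
  apply pvLoopDM_eq ram 1 _ (by omega)
  · intro j hj hj'
    rw [guard_iff ram hram]
    omega
  · rw [guard_iff ram hram]
    omega

theorem small_sv (ram : Int) (hram : ram ≤ 32) : pvLoopSV ram 1 = 1 := by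
  rw [pvLoopSV.eq_def, if_neg (by intro hcon; norm_num at hcon; omega)]

theorem small_dm (ram : Int) (hram : ram ≤ 32) : pvLoopDM ram 1 = 1 := by
  rw [pvLoopDM.eq_def, if_neg (by intro hcon; norm_num at hcon; omega)]

-- ===== VERDICT (by name: the statement is the Claim_ definition above) =====
theorem max_qubits_for_ram_py_spec : Claim_equal_max_qubits_for_ram_py := by
  intro ram mode _
  unfold Spec_max_qubits_for_ram_py max_qubits_for_ram_py max_qubits_for_ram_py_alt
  by_cases hm : mode == "dm"
  · rw [if_pos hm]
    by_cases hr : ram ≤ 32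
    · rw [if_pos hr, small_dm ram hr]
      norm_num
    · have hr' : 32 < ram := by omega
      have h6 := bl_ge_six ram hr'
      rw [if_neg hr, if_pos hm, dm_case ram hr',
        PySem.Int.floordiv_eq_ediv_of_pos (by norm_num)]
      omega
  · rw [if_neg hm]
    by_cases hr : ram ≤ 32
    · rw [if_pos hr, small_sv ram hr]
      norm_num
    · have hr' : 32 < ram := by omega
      have h6 := bl_ge_six ram hr'
      rw [if_neg hr, if_neg hm, sv_case ram hr']
      omega
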